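-- pv_equiv track=rewrite | github.com/Yashasv-Prajapati/GrowS-IIT-Ropar-1 | Challenge2/backend/home/views.py | bag_creation_strategy
-- ===== SOURCE A (Python) =====
-- data = {}
--
-- def bag_creation_strategy(bag_num_1, bag_num_2, num_vehicles):
--     """
--     Returns the bag creation strategy
--     bag_num_1 : Number of bags of type 1 (60 X 60 X 100 CMS = 360000 CM3)
--     bag_num_2 : Number of bags of type 2 (80 X 80 X 100 CMS = 640000 CM3)
--     """
--     capacity_1 = 360000
--     capacity_2 = 640000
--     # divide the bags of different capacities into vehicles such that volume of each vehicle is almost equal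
--     # return a list of lists, where each list contains the number of bags of each type in that vehicle
--
--     vehicles_bag_list = [[0, 0, 0] for i in range(num_vehicles)]
--
--     for i in range(num_vehicles):
--         vehicles_bag_list[i][0] = bag_num_1//num_vehicles
--         vehicles_bag_list[i][1] = bag_num_2//num_vehicles
--         vehicles_bag_list[i][2] = bag_num_1//num_vehicles * \
--             capacity_1 + bag_num_2//num_vehicles * capacity_2
--
--     vehicles_bag_list.sort(key=lambda x: x[2])
--
--     for i in range(bag_num_1 % num_vehicles):
--         vehicles_bag_list[i][0] += 1
--         vehicles_bag_list[i][2] += capacity_1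
--
--     vehicles_bag_list.sort(key=lambda x: x[2])
--
--     for i in range(bag_num_2 % num_vehicles):
--         vehicles_bag_list[i][1] += 1
--         vehicles_bag_list[i][2] += capacity_2
--
--     vehicle_demands = [0 for i in range(num_vehicles)]
--     for i in range(num_vehicles):
--         vehicle_demands[i] = vehicles_bag_list[i][2]
--
--     data['vehicle_capacities'] = vehicle_demands
--
--     return vehicles_bag_list
-- ===== SOURCE B (Python) =====
-- data = {}
--
-- def bag_creation_strategy(bag_num_1, bag_num_2, num_vehicles):
--     """Direct construction: compute each vehicle's bag counts from divmod
--     quotients and remainders in a single pass (no sorting, no in-place bumping).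
--     Also sets data['vehicle_capacities']."""
--     capacity_1 = 360000
--     capacity_2 = 640000
--     q1, r1 = divmod(bag_num_1, num_vehicles)  # ZeroDivisionError if num_vehicles == 0
--     q2, r2 = divmod(bag_num_2, num_vehicles)
--     n_plain = num_vehicles - r1
--     result = []
--     for idx in range(num_vehicles):
--         b1 = q1 + (1 if idx >= n_plain else 0)
--         b2 = q2 + (1 if idx < r2 else 0)
--         result.append([b1, b2, b1 * capacity_1 + b2 * capacity_2])
--     data['vehicle_capacities'] = [v[2] for v in result]
--     return result
-- ===== Notes on version B (the rewrite author's own statement) =====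
-- stated objective: simpler
-- what changed: Replaces the build/sort/bump-in-place/sort/bump pipeline with a single pass that computes each vehicle's bag counts directly from divmod quotients and remainders (the n-r1 unboosted vehicles first, then the r1 boosted ones, with the r2 extra type-2 bags going to the first r2 positions), eliminating both sorts and the in-place mutation passes; Pre_ excludes only num_vehicles == 0, where both raise ZeroDivisionError.
import Mathlib
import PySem

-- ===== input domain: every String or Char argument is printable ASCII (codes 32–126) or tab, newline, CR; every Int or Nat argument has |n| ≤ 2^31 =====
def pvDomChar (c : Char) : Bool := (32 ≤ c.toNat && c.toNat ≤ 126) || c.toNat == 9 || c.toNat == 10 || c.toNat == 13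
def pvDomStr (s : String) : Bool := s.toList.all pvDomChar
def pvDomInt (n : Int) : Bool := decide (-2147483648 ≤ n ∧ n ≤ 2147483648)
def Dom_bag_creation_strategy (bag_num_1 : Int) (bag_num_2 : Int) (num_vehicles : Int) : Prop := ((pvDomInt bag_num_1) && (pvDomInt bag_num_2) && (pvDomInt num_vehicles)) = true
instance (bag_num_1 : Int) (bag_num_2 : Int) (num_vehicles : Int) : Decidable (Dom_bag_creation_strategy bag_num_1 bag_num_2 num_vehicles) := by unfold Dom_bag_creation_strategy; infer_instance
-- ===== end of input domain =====

-- B replaces A's build/sort/bump/sort/bump pipeline by one direct pass (simpler, no sorting);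
-- the equivalence proved is about the RETURN value only: both Pythons also write the same
-- data['vehicle_capacities'] list into the module-level dict (a side effect, not modelled here).

-- ===== PORT A =====
def bag_creation_strategy (bag_num_1 : Int) (bag_num_2 : Int) (num_vehicles : Int) : List (List Int) :=
  let capacity_1 : Int := 360000
  let capacity_2 : Int := 640000
  -- '[[0,0,0] for i in range(num_vehicles)]' followed by the fill loop that overwrites
  -- every row with the same three values, expressed as the map it performs
  let vbl : List (List Int) :=
    (PySem.List.pyRange 0 num_vehicles 1).map (fun _ =>
      [PySem.Int.floordiv bag_num_1 num_vehicles,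
       PySem.Int.floordiv bag_num_2 num_vehicles,
       PySem.Int.floordiv bag_num_1 num_vehicles * capacity_1 +
         PySem.Int.floordiv bag_num_2 num_vehicles * capacity_2])
  let vbl := PySem.List.sorted vbl (fun x => x.getD 2 0)
  -- 'for i in range(bag_num_1 % num_vehicles): vbl[i][0] += 1; vbl[i][2] += capacity_1'
  -- (indices are always in range here, so the total pyGetD/pySetD forms are exact)
  let vbl := (PySem.List.pyRange 0 (PySem.Int.mod bag_num_1 num_vehicles) 1).foldl
      (fun acc i => PySem.List.pySetD acc i
        (let row := PySem.List.pyGetD acc i []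
         PySem.List.pySetD (PySem.List.pySetD row 0 (PySem.List.pyGetD row 0 0 + 1))
           2 (PySem.List.pyGetD row 2 0 + capacity_1))) vbl
  let vbl := PySem.List.sorted vbl (fun x => x.getD 2 0)
  -- 'for i in range(bag_num_2 % num_vehicles): vbl[i][1] += 1; vbl[i][2] += capacity_2'
  let vbl := (PySem.List.pyRange 0 (PySem.Int.mod bag_num_2 num_vehicles) 1).foldl
      (fun acc i => PySem.List.pySetD acc i
        (let row := PySem.List.pyGetD acc i []
         PySem.List.pySetD (PySem.List.pySetD row 1 (PySem.List.pyGetD row 1 0 + 1))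
           2 (PySem.List.pyGetD row 2 0 + capacity_2))) vbl
  vbl

-- ===== PORT B =====
def bag_creation_strategy_alt (bag_num_1 : Int) (bag_num_2 : Int) (num_vehicles : Int) : List (List Int) :=
  let capacity_1 : Int := 360000
  let capacity_2 : Int := 640000
  let q1 := PySem.Int.floordiv bag_num_1 num_vehicles
  let r1 := PySem.Int.mod bag_num_1 num_vehicles
  let q2 := PySem.Int.floordiv bag_num_2 num_vehicles
  let r2 := PySem.Int.mod bag_num_2 num_vehicles
  let nPlain := num_vehicles - r1
  (PySem.List.pyRange 0 num_vehicles 1).foldl (fun res idx =>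
    let v1 := q1 + (if nPlain ≤ idx then 1 else 0)
    let v2 := q2 + (if idx < r2 then 1 else 0)
    res ++ [[v1, v2, v1 * capacity_1 + v2 * capacity_2]]) []

-- ===== PRECONDITION & SPEC =====
-- Pre_ excludes exactly num_vehicles == 0, where A raises ZeroDivisionError (B raises there too).
def Pre_bag_creation_strategy (bag_num_1 : Int) (bag_num_2 : Int) (num_vehicles : Int) : Prop :=
  num_vehicles ≠ 0
instance (bag_num_1 : Int) (bag_num_2 : Int) (num_vehicles : Int) : Decidable (Pre_bag_creation_strategy bag_num_1 bag_num_2 num_vehicles) := by unfold Pre_bag_creation_strategy; infer_instance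

def pvWitness_bag_creation_strategy : Int × Int × Int := (7, 5, 3)

def Spec_bag_creation_strategy (bag_num_1 : Int) (bag_num_2 : Int) (num_vehicles : Int) (out : List (List Int)) : Prop := out = bag_creation_strategy_alt bag_num_1 bag_num_2 num_vehicles
instance (bag_num_1 : Int) (bag_num_2 : Int) (num_vehicles : Int) (out : List (List Int)) : Decidable (Spec_bag_creation_strategy bag_num_1 bag_num_2 num_vehicles out) := by unfold Spec_bag_creation_strategy; infer_instance

-- ===== CLAIM (what is proved, stated in full; the proofs are below) =====
def Claim_equal_bag_creation_strategy : Prop := ∀ (bag_num_1 : Int) (bag_num_2 : Int) (num_vehicles : Int), Dom_bag_creation_strategy bag_num_1 bag_num_2 num_vehicles → Pre_bag_creation_strategy bag_num_1 bag_num_2 num_vehicles → Spec_bag_creation_strategy bag_num_1 bag_num_2 num_vehicles (bag_creation_strategy bag_num_1 bag_num_2 num_vehicles)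

-- ===== LEMMAS AND PROOFS =====

lemma pv_foldl_bump {α : Type} (f : α → α) (d : α) (xs : List α) (r : Nat) (hr : r ≤ xs.length) :
    (PySem.List.pyRange 0 (r : Int) 1).foldl
      (fun acc i => PySem.List.pySetD acc i (f (PySem.List.pyGetD acc i d))) xs
    = (xs.take r).map f ++ xs.drop r := by
  induction r with
  | zero => simp [PySem.List.pyRange_one_eq_nil]
  | succ r ih =>
    have hr' : r ≤ xs.length := Nat.le_of_succ_le hr
    have hrl : r < xs.length := hr
    have hsplit : PySem.List.pyRange 0 ((r+1 : Nat) : Int) 1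
        = PySem.List.pyRange 0 (r : Nat) 1 ++ [(r : Int)] := by
      push_cast
      exact PySem.List.pyRange_one_succ_right (by exact_mod_cast Nat.zero_le r)
    rw [hsplit, List.foldl_append, ih hr']
    set acc := (xs.take r).map f ++ xs.drop r with hacc
    have hlenpre : ((xs.take r).map f).length = r := by
      simp [List.length_take, Nat.min_eq_left hr']
    have hget : PySem.List.pyGetD acc (r : Int) d = xs[r] := by
      rw [PySem.List.pyGetD_natCast]
      have : acc[r]? = some xs[r] := by
        rw [hacc, List.getElem?_append_right (by omega), hlenpre]
        simp [List.getElem?_drop]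
      simp [List.getD, this]
    rw [List.foldl_cons, List.foldl_nil, hget, PySem.List.pySetD_natCast]
    rw [hacc, List.set_append_right _ _ (by omega), hlenpre]
    have hdrop : xs.drop r = xs[r] :: xs.drop (r+1) := List.drop_eq_getElem_cons hrl
    rw [hdrop, Nat.sub_self, List.set_cons_zero]
    have hrm : r < (List.map f xs).length := by simpa using hrl
    have htake : List.take (r+1) (List.map f xs) = List.take r (List.map f xs) ++ [f xs[r]] := by
      rw [List.take_add_one, List.getElem?_eq_getElem hrm]
      simp
    have hfin : List.map f (List.take (r+1) xs) = List.map f (List.take r xs) ++ [f xs[r]] := by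
      rw [List.map_take, List.map_take, htake]
    rw [hfin]
    simp

lemma pv_insertBy_self {α : Type} (before : α → α → Bool) (x : α) (hxx : before x x = false) (m : Nat) :
    PySem.List.insertBy before x (List.replicate m x) = List.replicate (m+1) x := by
  rw [PySem.List.insertBy_of_forall_not_before before x _
      (fun y hy => by rw [List.eq_of_mem_replicate hy]; exact hxx), List.replicate_succ']

lemma pv_insertBy_front {α : Type} (before : α → α → Bool) (x y : α)
    (hyy : before y y = false) (hyx : before y x = true) (m a : Nat) :
    PySem.List.insertBy before y (List.replicate m y ++ List.replicate a x)
      = List.replicate (m+1) y ++ List.replicate a x := by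
  induction m with
  | zero =>
    cases a with
    | zero => simp [PySem.List.insertBy]
    | succ a => simp [List.replicate_succ, PySem.List.insertBy, hyx]
  | succ m ih =>
    simp only [List.replicate_succ, List.cons_append, PySem.List.insertBy, hyy]
    simp only [Bool.false_eq_true, if_false]
    rw [ih]
    simp [List.replicate_succ]

lemma pv_sort_two_blocks {κ : Type} [LinearOrder κ] (key : List Int → κ) (x y : List Int)
    (hxy : key y < key x) (a b : Nat) :
    PySem.List.sorted (List.replicate a x ++ List.replicate b y) key
      = List.replicate b y ++ List.replicate a x := by
  rw [PySem.List.sorted_eq_foldl_insertBy, List.foldl_append]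
  have hstep1 : List.foldl (fun acc z => PySem.List.insertBy (fun p q => decide (key p < key q)) z acc)
      [] (List.replicate a x) = List.replicate a x := by
    induction a with
    | zero => rfl
    | succ a ih =>
      rw [List.replicate_succ', List.foldl_append, ih]
      simp only [List.foldl_cons, List.foldl_nil]
      rw [← List.replicate_succ']
      exact pv_insertBy_self (fun p q => decide (key p < key q)) x (by show decide (key x < key x) = false; simp) a
  rw [hstep1]
  induction b with
  | zero => simp
  | succ b ih =>
    rw [List.replicate_succ', List.foldl_append, ih]
    simp only [List.foldl_cons, List.foldl_nil]
    rw [← List.replicate_succ']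
    exact pv_insertBy_front (fun p q => decide (key p < key q)) x y
      (by show decide (key y < key y) = false; simp)
      (by show decide (key y < key x) = true; simp [hxy]) b a

-- a fold whose step sends [] to [] keeps the accumulator []
lemma pv_foldl_nil {α β : Type} (f : List α → β → List α) (l : List β) (h : ∀ i, f [] i = []) :
    l.foldl f [] = [] := by
  induction l with
  | nil => rfl
  | cons x xs ih => simp only [List.foldl_cons, h x]; exact ih

-- a map over a range on which the function is constant is a replicate
lemma pv_map_seg (a b : Int) (G : Int → List Int) (c : List Int)
    (h : ∀ i : Int, a ≤ i → i < b → G i = c) :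
    (PySem.List.pyRange a b 1).map G = List.replicate (b - a).toNat c := by
  rw [List.map_congr_left (fun i hi => h i (PySem.List.mem_pyRange_one.mp hi).1
        (PySem.List.mem_pyRange_one.mp hi).2)]
  rw [List.map_const', PySem.List.length_pyRange_one]

-- ===== VERDICT (by name: the statement is the Claim_ definition above) =====
theorem bag_creation_strategy_spec : Claim_equal_bag_creation_strategy := by
  intro b1 b2 n _ hpre
  unfold Spec_bag_creation_strategy
  rcases lt_or_gt_of_ne hpre with hneg | hpos
  · -- num_vehicles < 0 : both loops run over empty ranges, both return []
    simp only [bag_creation_strategy, bag_creation_strategy_alt]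
    rw [PySem.List.pyRange_one_eq_nil (le_of_lt hneg)]
    simp only [List.map_nil, List.foldl_nil]
    rw [(PySem.List.sorted_eq_nil_iff _ _ _).mpr rfl]
    rw [pv_foldl_nil _ _ (fun i => by cases h : PySem.List.pyIdx? (0:Nat) i <;> simp [PySem.List.pySetD, PySem.List.pySet?, h])]
    rw [(PySem.List.sorted_eq_nil_iff _ _ _).mpr rfl]
    rw [pv_foldl_nil _ _ (fun i => by cases h : PySem.List.pyIdx? (0:Nat) i <;> simp [PySem.List.pySetD, PySem.List.pySet?, h])]
  · simp only [bag_creation_strategy, bag_creation_strategy_alt]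
    have hNn : n = ((n.toNat : Nat) : Int) := (Int.toNat_of_nonneg (le_of_lt hpos)).symm
    rw [hNn]
    set N := n.toNat with hN
    have hposN : (0:Int) < (N:Int) := by omega
    have hr1nn : 0 ≤ PySem.Int.mod b1 (N:Int) := PySem.Int.mod_nonneg b1 hposN
    have hr2nn : 0 ≤ PySem.Int.mod b2 (N:Int) := PySem.Int.mod_nonneg b2 hposN
    have hr1lt : PySem.Int.mod b1 (N:Int) < (N:Int) := PySem.Int.mod_lt b1 hposN
    have hr2lt : PySem.Int.mod b2 (N:Int) < (N:Int) := PySem.Int.mod_lt b2 hposN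
    rw [show PySem.Int.mod b1 (N:Int) = (((PySem.Int.mod b1 (N:Int)).toNat : Nat) : Int) from
      (Int.toNat_of_nonneg hr1nn).symm]
    rw [show PySem.Int.mod b2 (N:Int) = (((PySem.Int.mod b2 (N:Int)).toNat : Nat) : Int) from
      (Int.toNat_of_nonneg hr2nn).symm]
    set R1 := (PySem.Int.mod b1 (N:Int)).toNat with hR1
    set R2 := (PySem.Int.mod b2 (N:Int)).toNat with hR2
    set q1 := PySem.Int.floordiv b1 (N:Int) with hq1
    set q2 := PySem.Int.floordiv b2 (N:Int) with hq2
    have hR1N : R1 < N := by omega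
    have hR2N : R2 < N := by omega
    set row0 : List Int := [q1, q2, q1 * 360000 + q2 * 640000] with hrow0
    -- A: the initial comprehension+fill is a constant list
    rw [List.map_const', PySem.List.length_pyRange_one]
    simp only [sub_zero, Int.toNat_natCast]
    -- A: first sort of a constant list is the identity
    rw [PySem.List.sorted_eq_self_of_pairwise _ _ (List.pairwise_replicate.mpr (Or.inr (le_refl _)))]
    -- A: the first bump loop maps over the first R1 rows
    have hfold1 : ∀ xs : List (List Int), R1 ≤ xs.length →
        List.foldl (fun acc i => PySem.List.pySetD acc i
            (PySem.List.pySetD (PySem.List.pySetD (PySem.List.pyGetD acc i []) 0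
                (PySem.List.pyGetD (PySem.List.pyGetD acc i []) 0 0 + 1)) 2
              (PySem.List.pyGetD (PySem.List.pyGetD acc i []) 2 0 + 360000))) xs
          (PySem.List.pyRange 0 (R1:Int))
        = (xs.take R1).map (fun row => PySem.List.pySetD (PySem.List.pySetD row 0
            (PySem.List.pyGetD row 0 0 + 1)) 2 (PySem.List.pyGetD row 2 0 + 360000)) ++ xs.drop R1 :=
      fun xs h => pv_foldl_bump (fun row => PySem.List.pySetD (PySem.List.pySetD row 0
        (PySem.List.pyGetD row 0 0 + 1)) 2 (PySem.List.pyGetD row 2 0 + 360000)) [] xs R1 h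
    rw [hfold1 _ (by rw [List.length_replicate]; omega)]
    rw [List.take_replicate, List.drop_replicate, List.map_replicate,
        Nat.min_eq_left (le_of_lt hR1N)]
    rw [show PySem.List.pySetD (PySem.List.pySetD row0 0 (PySem.List.pyGetD row0 0 0 + 1)) 2
          (PySem.List.pyGetD row0 2 0 + 360000)
        = [q1 + 1, q2, q1 * 360000 + q2 * 640000 + 360000] from rfl]
    -- A: the second sort swaps the two constant blocks
    rw [pv_sort_two_blocks (fun x => x.getD 2 0) [q1 + 1, q2, q1 * 360000 + q2 * 640000 + 360000]
        row0 (by rw [hrow0]; simp [List.getD]) R1 (N - R1)]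
    -- A: the second bump loop
    have hfold2 : ∀ xs : List (List Int), R2 ≤ xs.length →
        List.foldl (fun acc i => PySem.List.pySetD acc i
            (PySem.List.pySetD (PySem.List.pySetD (PySem.List.pyGetD acc i []) 1
                (PySem.List.pyGetD (PySem.List.pyGetD acc i []) 1 0 + 1)) 2
              (PySem.List.pyGetD (PySem.List.pyGetD acc i []) 2 0 + 640000))) xs
          (PySem.List.pyRange 0 (R2:Int))
        = (xs.take R2).map (fun row => PySem.List.pySetD (PySem.List.pySetD row 1
            (PySem.List.pyGetD row 1 0 + 1)) 2 (PySem.List.pyGetD row 2 0 + 640000)) ++ xs.drop R2 :=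
      fun xs h => pv_foldl_bump (fun row => PySem.List.pySetD (PySem.List.pySetD row 1
        (PySem.List.pyGetD row 1 0 + 1)) 2 (PySem.List.pyGetD row 2 0 + 640000)) [] xs R2 h
    rw [hfold2 _ (by simp only [List.length_append, List.length_replicate]; omega)]
    -- B: the fold that appends one row per vehicle is a map
    rw [PySem.List.foldl_append_singleton_eq_map, List.nil_append]
    set rowA : List Int := [q1 + 1, q2, q1 * 360000 + q2 * 640000 + 360000] with hrowA
    set G : Int → List Int := (fun idx =>
        [q1 + if (N:Int) - (R1:Int) ≤ idx then 1 else 0, q2 + if idx < (R2:Int) then 1 else 0,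
          (q1 + if (N:Int) - (R1:Int) ≤ idx then 1 else 0) * 360000 +
            (q2 + if idx < (R2:Int) then 1 else 0) * 640000]) with hG
    rcases le_or_gt R2 (N - R1) with hsplit | hsplit
    · -- all r2 extra type-2 bags fit in the unboosted block
      rw [PySem.List.pyRange_one_append 0 (((N - R1 : Nat)):Int) (N:Int) (by omega) (by omega)]
      rw [PySem.List.pyRange_one_append 0 ((R2:Nat):Int) (((N - R1 : Nat)):Int) (by omega) (by omega)]
      simp only [List.map_append]
      rw [pv_map_seg 0 (R2:Int) G [q1, q2 + 1, q1 * 360000 + q2 * 640000 + 640000]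
          (fun i hi1 hi2 => by
            rw [hG]
            simp only [if_neg (show ¬ ((N:Int) - (R1:Int) ≤ i) by omega), if_pos hi2]
            simp only [List.cons.injEq, add_zero, and_true, true_and, and_self]
            try omega)]
      rw [pv_map_seg ((R2:Nat):Int) (((N - R1 : Nat)):Int) G row0
          (fun i hi1 hi2 => by
            rw [hG]
            simp only [if_neg (show ¬ ((N:Int) - (R1:Int) ≤ i) by omega),
              if_neg (show ¬ (i < (R2:Int)) by omega), hrow0]
            simp only [List.cons.injEq, add_zero, and_true, true_and, and_self]
            try omega)]
      rw [pv_map_seg (((N - R1 : Nat)):Int) (N:Int) G rowA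
          (fun i hi1 hi2 => by
            rw [hG]
            simp only [if_pos (show (N:Int) - (R1:Int) ≤ i by omega),
              if_neg (show ¬ (i < (R2:Int)) by omega), hrowA]
            simp only [List.cons.injEq, add_zero, and_true, true_and, and_self]
            try omega)]
      -- A side: take/drop of the two-block list
      simp only [List.take_append, List.drop_append, List.length_replicate,
        List.take_replicate, List.drop_replicate, List.map_append, List.map_replicate,
        Nat.min_eq_left hsplit, Nat.sub_eq_zero_of_le hsplit, Nat.zero_min,
        List.replicate_zero, List.map_nil, Nat.sub_zero, List.nil_append, List.append_nil]
      rw [show PySem.List.pySetD (PySem.List.pySetD row0 1 (PySem.List.pyGetD row0 1 0 + 1)) 2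
            (PySem.List.pyGetD row0 2 0 + 640000)
          = [q1, q2 + 1, q1 * 360000 + q2 * 640000 + 640000] from rfl]
      rw [show ((((N - R1 : Nat)):Int) - ((R2:Nat):Int)).toNat = N - R1 - R2 from by omega]
      rw [show (((N:Nat):Int) - (((N - R1 : Nat)):Int)).toNat = R1 from by omega]
      simp only [sub_zero, Int.toNat_natCast, List.append_assoc]
    · -- the extra type-2 bags overflow into the boosted block
      rw [PySem.List.pyRange_one_append 0 ((R2:Nat):Int) (N:Int) (by omega) (by omega)]
      rw [PySem.List.pyRange_one_append 0 (((N - R1 : Nat)):Int) ((R2:Nat):Int) (by omega) (by omega)]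
      simp only [List.map_append]
      rw [pv_map_seg 0 (((N - R1 : Nat)):Int) G [q1, q2 + 1, q1 * 360000 + q2 * 640000 + 640000]
          (fun i hi1 hi2 => by
            rw [hG]
            simp only [if_neg (show ¬ ((N:Int) - (R1:Int) ≤ i) by omega),
              if_pos (show i < (R2:Int) by omega)]
            simp only [List.cons.injEq, add_zero, and_true, true_and, and_self]
            try omega)]
      rw [pv_map_seg (((N - R1 : Nat)):Int) ((R2:Nat):Int) G
          [q1 + 1, q2 + 1, q1 * 360000 + q2 * 640000 + 360000 + 640000]
          (fun i hi1 hi2 => by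
            rw [hG]
            simp only [if_pos (show (N:Int) - (R1:Int) ≤ i by omega), if_pos hi2]
            simp only [List.cons.injEq, add_zero, and_true, true_and, and_self]
            try omega)]
      rw [pv_map_seg ((R2:Nat):Int) (N:Int) G rowA
          (fun i hi1 hi2 => by
            rw [hG]
            simp only [if_pos (show (N:Int) - (R1:Int) ≤ i by omega),
              if_neg (show ¬ (i < (R2:Int)) by omega), hrowA]
            simp only [List.cons.injEq, add_zero, and_true, true_and, and_self]
            try omega)]
      -- A side
      simp only [List.take_append, List.drop_append, List.length_replicate,
        List.take_replicate, List.drop_replicate, List.map_append, List.map_replicate,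
        Nat.min_eq_right (by omega : N - R1 ≤ R2), Nat.min_eq_left (show R2 - (N - R1) ≤ R1 from by omega),
        Nat.sub_eq_zero_of_le (by omega : N - R1 ≤ R2), List.replicate_zero, List.nil_append]
      rw [show PySem.List.pySetD (PySem.List.pySetD row0 1 (PySem.List.pyGetD row0 1 0 + 1)) 2
            (PySem.List.pyGetD row0 2 0 + 640000)
          = [q1, q2 + 1, q1 * 360000 + q2 * 640000 + 640000] from rfl]
      rw [show PySem.List.pySetD (PySem.List.pySetD rowA 1 (PySem.List.pyGetD rowA 1 0 + 1)) 2
            (PySem.List.pyGetD rowA 2 0 + 640000)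
          = [q1 + 1, q2 + 1, q1 * 360000 + q2 * 640000 + 360000 + 640000] from rfl]
      rw [show R1 - (R2 - (N - R1)) = N - R2 from by omega]
      rw [show ((((N:Nat)):Int) - ((R2:Nat):Int)).toNat = N - R2 from by omega]
      rw [show (((R2:Nat):Int) - (((N - R1 : Nat)):Int)).toNat = R2 - (N - R1) from by omega]
      simp only [sub_zero, Int.toNat_natCast, List.append_assoc]
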